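-- pv_equiv track=rewrite | github.com/ThomasHEBRARD/dtu | 02269_process_mining/assignment3/assignment3copy.py | dependency_graph
-- ===== SOURCE A (Python) =====
-- def dependency_graph(log):
--     for key, value in log.items():
--         log[key] = [v["concept:name"] for v in value]
--
--     TEMP = {}
--     for tasks in log.values():
--         for i in range(len(tasks) - 1):
--             if tasks[i] not in TEMP:
--                 TEMP[tasks[i]] = {tasks[i + 1]: 1}
--             elif tasks[i + 1] not in TEMP[tasks[i]]:
--                 TEMP[tasks[i]][tasks[i + 1]] = 1
--             else:
--                 TEMP[tasks[i]][tasks[i + 1]] += 1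
--     return TEMP
-- ===== SOURCE B (Python) =====
-- def dependency_graph(log):
--     # same in-place normalisation of the log as the original
--     for key, value in log.items():
--         log[key] = [v["concept:name"] for v in value]
--
--     # count-then-group: flat list of all adjacent pairs, one flat count table,
--     # then reshape the flat table into the nested dict
--     pairs = [p for tasks in log.values() for p in zip(tasks, tasks[1:])]
--     counts = {}
--     for p in pairs:
--         counts[p] = counts.get(p, 0) + 1
--     result = {}
--     for (a, b), c in counts.items():
--         result.setdefault(a, {})[b] = c
--     return result
-- ===== Notes on version B (the rewrite author's own statement) =====
-- stated objective: alternative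
-- what changed: Replaces the incremental three-branch nested-dict update inside the index loop by a count-then-group decomposition: build the flat list of all adjacent pairs via zip(tasks, tasks[1:]), count it in one flat table, then reshape that table into the nested dict in a second pass.
import Mathlib
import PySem

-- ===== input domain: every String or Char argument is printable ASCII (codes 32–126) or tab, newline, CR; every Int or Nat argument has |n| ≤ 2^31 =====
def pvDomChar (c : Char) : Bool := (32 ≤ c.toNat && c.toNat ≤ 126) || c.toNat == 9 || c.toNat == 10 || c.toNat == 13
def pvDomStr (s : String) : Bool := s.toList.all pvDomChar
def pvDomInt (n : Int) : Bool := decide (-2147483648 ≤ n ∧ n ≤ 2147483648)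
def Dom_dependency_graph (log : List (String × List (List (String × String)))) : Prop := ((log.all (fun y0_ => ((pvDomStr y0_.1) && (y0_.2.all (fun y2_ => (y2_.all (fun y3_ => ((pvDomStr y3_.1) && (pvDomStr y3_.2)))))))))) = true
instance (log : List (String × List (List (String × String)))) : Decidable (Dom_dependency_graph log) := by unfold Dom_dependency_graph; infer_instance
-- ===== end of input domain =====

-- B replaces A's incremental three-branch nested-dict update by a count-then-group pass over the
-- flat list of adjacent pairs (alternative decomposition, same cost). A mutates its argument dict
-- in place (B does the same); the equivalence proved here is about the RETURN value.

-- ===== PORT A =====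
def dependency_graph (log : List (String × List (List (String × String)))) : List (String × List (String × Int)) :=
  -- for key, value in log.items(): log[key] = [v["concept:name"] for v in value]
  -- (reassigning each existing key in place keeps the dict order: a map over the items;
  --  a missing "concept:name" key raises KeyError — excluded by Pre_)
  let log2 : PySem.Dict String (List String) :=
    PySem.Dict.mk (((PySem.Dict.ofList log).items).map (fun kv =>
      (kv.1, kv.2.map (fun ev => PySem.Dict.getD (PySem.Dict.ofList ev) "concept:name" ""))))
  let temp : PySem.Dict String (PySem.Dict String Int) :=
    log2.values.foldl (fun T tasks =>
      (PySem.List.pyRange 0 ((tasks.length : Int) - 1) 1).foldl (fun T i =>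
        let a := PySem.List.pyGetD tasks i ""        -- tasks[i]   (index always in range here)
        let b := PySem.List.pyGetD tasks (i + 1) ""  -- tasks[i+1]
        if T.contains a = false then
          T.insert a (PySem.Dict.ofList [(b, 1)])
        else if (T.getD a PySem.Dict.empty).contains b = false then
          T.insert a ((T.getD a PySem.Dict.empty).insert b 1)        -- TEMP[a][b] = 1 (in place)
        else
          T.insert a ((T.getD a PySem.Dict.empty).insert b
            ((T.getD a PySem.Dict.empty).getD b 0 + 1))              -- TEMP[a][b] += 1 (in place)
        ) T) PySem.Dict.empty
  temp.items.map (fun p => (p.1, p.2.items))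

-- ===== PORT B =====
def dependency_graph_alt (log : List (String × List (List (String × String)))) : List (String × List (String × Int)) :=
  -- identical in-place normalisation loop
  let log2 : PySem.Dict String (List String) :=
    PySem.Dict.mk (((PySem.Dict.ofList log).items).map (fun kv =>
      (kv.1, kv.2.map (fun ev => PySem.Dict.getD (PySem.Dict.ofList ev) "concept:name" ""))))
  -- pairs = [p for tasks in log.values() for p in zip(tasks, tasks[1:])]
  let pairs : List (String × String) := log2.values.flatMap (fun tasks => tasks.zip (tasks.drop 1))
  -- counts[p] = counts.get(p, 0) + 1
  let counts : PySem.Dict (String × String) Int :=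
    pairs.foldl (fun d p => d.insert p (d.getD p 0 + 1)) PySem.Dict.empty
  -- result.setdefault(a, {})[b] = c
  let result : PySem.Dict String (PySem.Dict String Int) :=
    counts.items.foldl (fun r pc =>
      r.insert pc.1.1 ((r.getD pc.1.1 PySem.Dict.empty).insert pc.1.2 pc.2)) PySem.Dict.empty
  result.items.map (fun p => (p.1, p.2.items))

-- ===== PRECONDITION & SPEC =====
-- Pre_ excludes exactly the logs in which some event dict lacks the "concept:name" key:
-- there the Python raises KeyError.
def Pre_dependency_graph (log : List (String × List (List (String × String)))) : Prop :=
  (((PySem.Dict.ofList log).items).all (fun kv =>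
    kv.2.all (fun ev => ev.any (fun q => q.1 == "concept:name")))) = true
instance (log : List (String × List (List (String × String)))) : Decidable (Pre_dependency_graph log) := by unfold Pre_dependency_graph; infer_instance
def pvWitness_dependency_graph : (List (String × List (List (String × String)))) :=
  [("c1", [[("concept:name", "a")], [("concept:name", "b")], [("concept:name", "a")]])]

def Spec_dependency_graph (log : List (String × List (List (String × String)))) (out : List (String × List (String × Int))) : Prop := out = dependency_graph_alt log
instance (log : List (String × List (List (String × String)))) (out : List (String × List (String × Int))) : Decidable (Spec_dependency_graph log out) := by unfold Spec_dependency_graph; infer_instance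

-- ===== CLAIM (what is proved, stated in full; the proofs are below) =====
def Claim_equal_dependency_graph : Prop := ∀ (log : List (String × List (List (String × String)))), Dom_dependency_graph log → Pre_dependency_graph log → Spec_dependency_graph log (dependency_graph log)

-- ===== LEMMAS AND PROOFS =====

def pstep (r : PySem.Dict String (PySem.Dict String Int)) (pc : (String × String) × Int) :
    PySem.Dict String (PySem.Dict String Int) :=
  r.insert pc.1.1 ((r.getD pc.1.1 PySem.Dict.empty).insert pc.1.2 pc.2)

def rsh (l : List ((String × String) × Int)) : PySem.Dict String (PySem.Dict String Int) :=
  l.foldl pstep PySem.Dict.empty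

def Fitems (l : List ((String × String) × Int)) : List (String × PySem.Dict String Int) :=
  (PySem.Set.ofList (l.map (fun q => q.1.1))).map (fun a =>
    (a, PySem.Dict.mk ((l.filter (fun q => q.1.1 == a)).map (fun q => (q.1.2, q.2)))))

theorem keys_of_items_eq_Fitems (l : List ((String × String) × Int))
    (h : (rsh l).items = Fitems l) :
    (rsh l).keys = PySem.Set.ofList (l.map (fun q => q.1.1)) := by
  show ((rsh l).items).map (fun x => x.1) = _
  rw [h]
  unfold Fitems
  rw [List.map_map]
  simp only [Function.comp_def]
  exact List.map_id' _

theorem rsh_items (l : List ((String × String) × Int))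
    (hnd : (l.map (fun q => q.1)).Nodup) : (rsh l).items = Fitems l := by
  induction l using List.reverseRecOn with
  | nil => rfl
  | append_singleton l q ih =>
    obtain ⟨⟨a, b⟩, v⟩ := q
    rw [List.map_append, List.nodup_append] at hnd
    obtain ⟨hl, -, hdisj⟩ := hnd
    have hq : ((a, b) : String × String) ∉ l.map (fun q => q.1) := by
      intro hmem
      exact hdisj _ hmem (a, b) (by simp) rfl
    have IH := ih hl
    have hkeys : (rsh l).keys = PySem.Set.ofList (l.map (fun q => q.1.1)) :=
      keys_of_items_eq_Fitems l IH
    have hknd : (rsh l).keys.Nodup := by rw [hkeys]; exact PySem.Set.nodup_ofList _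
    have hstep : rsh (l ++ [((a, b), v)]) = pstep (rsh l) ((a, b), v) := by
      unfold rsh; rw [List.foldl_append]; rfl
    rw [hstep]
    unfold pstep
    simp only
    -- outer set recurrence
    have hset : PySem.Set.ofList ((l ++ [((a, b), v)]).map (fun q => q.1.1))
        = (PySem.Set.ofList (l.map (fun q => q.1.1))).add a := by
      rw [List.map_append, PySem.Set.ofList_append]
      simp [PySem.Set.update_cons, PySem.Set.update_nil]
    by_cases hmem : a ∈ PySem.Set.ofList (l.map (fun q => q.1.1))
    · -- a already an outer key
      have hcont : (rsh l).contains a = true := by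
        rw [PySem.Dict.contains_eq_decide_mem_keys, hkeys]; simpa using hmem
      -- the inner dict at a
      have hin : ((a, PySem.Dict.mk ((l.filter (fun q => q.1.1 == a)).map (fun q => (q.1.2, q.2))))
          ∈ (rsh l).items) := by
        rw [IH]; unfold Fitems; exact List.mem_map_of_mem hmem
      have hgetD : (rsh l).getD a PySem.Dict.empty
          = PySem.Dict.mk ((l.filter (fun q => q.1.1 == a)).map (fun q => (q.1.2, q.2))) :=
        PySem.Dict.getD_of_mem_items _ hin hknd _
      have hbnotin : (PySem.Dict.mk ((l.filter (fun q => q.1.1 == a)).map (fun q => (q.1.2, q.2)))).contains b = false := by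
        rw [PySem.Dict.contains_eq_decide_mem_keys]
        simp only [decide_eq_false_iff_not]
        intro hb
        unfold PySem.Dict.keys at hb
        rw [List.map_map] at hb
        obtain ⟨q, hql, hqe⟩ := List.mem_map.mp hb
        obtain ⟨hqmem, hqa⟩ := List.mem_filter.mp hql
        apply hq
        have : q.1 = (a, b) := by
          have h1 : q.1.1 = a := by simpa using hqa
          have h2 : q.1.2 = b := hqe
          exact Prod.ext h1 h2
        rw [← this]
        exact List.mem_map_of_mem hqmem
      have hinsitems : (((rsh l).getD a PySem.Dict.empty).insert b v).items
          = (l.filter (fun q => q.1.1 == a)).map (fun q => (q.1.2, q.2)) ++ [(b, v)] := by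
        rw [hgetD, PySem.Dict.items_insert_of_not_contains _ _ hbnotin]
      rw [PySem.Dict.items_insert_of_contains _ _ hcont, IH]
      unfold Fitems
      rw [hset, PySem.Set.add, if_pos (by simpa [PySem.Set.contains] using hmem)]
      rw [List.map_map]
      apply List.map_congr_left
      intro a' ha'
      by_cases haa : a' = a
      · subst haa
        simp only [Function.comp_apply, beq_self_eq_true, if_pos]
        have : ((rsh l).getD a' PySem.Dict.empty).insert b v
            = PySem.Dict.mk ((((l ++ [((a', b), v)]).filter (fun q => q.1.1 == a')).map (fun q => (q.1.2, q.2)))) := by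
          apply PySem.Dict.ext
          rw [hinsitems]
          rw [List.filter_append, List.map_append]
          simp
        rw [this]
      · simp only [Function.comp_apply]
        rw [if_neg (by simpa using haa)]
        rw [List.filter_append]
        have : List.filter (fun q => q.1.1 == a') [((a, b), v)] = [] := by
          simp [Ne.symm haa]
        rw [this, List.append_nil]
    · -- a is a fresh outer key
      have hcont : (rsh l).contains a = false := by
        rw [PySem.Dict.contains_eq_decide_mem_keys, hkeys]; simpa using hmem
      have hgetD : (rsh l).getD a PySem.Dict.empty = PySem.Dict.empty :=
        PySem.Dict.getD_of_not_contains _ _ hcont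
      rw [PySem.Dict.items_insert_of_not_contains _ _ hcont, IH]
      unfold Fitems
      rw [hset, PySem.Set.add, if_neg (by simpa [PySem.Set.contains] using hmem)]
      rw [List.map_append]
      congr 1
      · apply List.map_congr_left
        intro a' ha'
        have hne : a' ≠ a := fun h => hmem (h ▸ ha')
        rw [List.filter_append]
        have : List.filter (fun q => q.1.1 == a') [((a, b), v)] = [] := by
          simp [Ne.symm hne]
        rw [this, List.append_nil]
      · simp only [List.map_cons, List.map_nil]
        congr 1
        have hfl : List.filter (fun q => q.1.1 == a) l = [] := by
          rw [List.filter_eq_nil_iff]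
          intro q hql hqa
          apply hmem
          rw [PySem.Set.mem_ofList]
          exact (by simpa using hqa : q.1.1 = a) ▸ List.mem_map_of_mem hql
        rw [hgetD]
        apply congrArg
        apply PySem.Dict.ext
        rw [PySem.Dict.items_insert_of_not_contains _ _ (by rfl)]
        rw [List.filter_append, hfl]
        simp
        rfl

theorem fl_keys_nodup (l : List ((String × String) × Int))
    (hnd : (l.map (fun q => q.1)).Nodup) (a : String) :
    (((l.filter (fun q => q.1.1 == a)).map (fun q => (q.1.2, q.2))).map (fun x => x.1)).Nodup := by
  have h1 : ((l.filter (fun q => q.1.1 == a)).map (fun q => q.1)).Nodup :=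
    ((List.filter_sublist (p := fun q => q.1.1 == a) (l := l)).map (fun q => (q.1 : String × String))).nodup hnd
  have h2 : ((l.filter (fun q => q.1.1 == a)).map (fun q => q.1.2)).Nodup := by
    have : (l.filter (fun q => q.1.1 == a)).map (fun q => q.1.2)
        = ((l.filter (fun q => q.1.1 == a)).map (fun q => q.1)).map (fun x => x.2) := by
      rw [List.map_map]; rfl
    rw [this]
    apply List.Nodup.map_on _ h1
    intro x hx y hy hxy
    obtain ⟨qx, hqx, rfl⟩ := List.mem_map.mp hx
    obtain ⟨qy, hqy, rfl⟩ := List.mem_map.mp hy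
    have hax : qx.1.1 = a := by simpa using (List.mem_filter.mp hqx).2
    have hay : qy.1.1 = a := by simpa using (List.mem_filter.mp hqy).2
    exact Prod.ext (hax.trans hay.symm) hxy
  simpa [List.map_map] using h2

theorem mem_fl_of_key (l : List ((String × String) × Int)) {a b : String} {c : Int}
    (h : ((a, b), c) ∈ l) :
    ((b, c) : String × Int) ∈ (l.filter (fun q => q.1.1 == a)).map (fun q => (q.1.2, q.2)) := by
  apply List.mem_map.mpr
  exact ⟨((a, b), c), List.mem_filter.mpr ⟨h, by simp⟩, rfl⟩

theorem rsh_getD_getD (d : PySem.Dict (String × String) Int) (hnd : d.keys.Nodup)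
    (a b : String) :
    ((rsh d.items).getD a PySem.Dict.empty).getD b 0 = d.getD (a, b) 0 := by
  have hnd' : (d.items.map (fun q => q.1)).Nodup := hnd
  have IH := rsh_items d.items hnd'
  have hkeys := keys_of_items_eq_Fitems d.items IH
  have hknd : (rsh d.items).keys.Nodup := by rw [hkeys]; exact PySem.Set.nodup_ofList _
  by_cases hmem : a ∈ PySem.Set.ofList (d.items.map (fun q => q.1.1))
  · have hin : ((a, PySem.Dict.mk ((d.items.filter (fun q => q.1.1 == a)).map (fun q => (q.1.2, q.2))))
        ∈ (rsh d.items).items) := by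
      rw [IH]; unfold Fitems; exact List.mem_map_of_mem hmem
    rw [PySem.Dict.getD_of_mem_items _ hin hknd]
    by_cases hb : (a, b) ∈ d.items.map (fun q => q.1)
    · obtain ⟨q, hql, hqe⟩ := List.mem_map.mp hb
      obtain ⟨⟨a', b'⟩, c⟩ := q
      rw [show ((a', b') : String × String) = (a, b) from hqe] at hql
      rw [PySem.Dict.getD_of_mem_items _ (mem_fl_of_key d.items hql) (fl_keys_nodup d.items hnd' a),
        PySem.Dict.getD_of_mem_items d hql hnd]
    · have h1 : (PySem.Dict.mk ((d.items.filter (fun q => q.1.1 == a)).map (fun q => (q.1.2, q.2)))).contains b = false := by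
        rw [PySem.Dict.contains_eq_decide_mem_keys]
        simp only [decide_eq_false_iff_not]
        intro hbk
        apply hb
        obtain ⟨q, hql, hqe⟩ := List.mem_map.mp hbk
        obtain ⟨q', hq'l, hq'e⟩ := List.mem_map.mp hql
        obtain ⟨hq'mem, hq'a⟩ := List.mem_filter.mp hq'l
        have : q'.1 = (a, b) := Prod.ext (by simpa using hq'a) (by rw [← hq'e] at hqe; simpa using hqe)
        exact this ▸ List.mem_map_of_mem hq'mem
      have h2 : d.contains (a, b) = false := by
        rw [PySem.Dict.contains_eq_decide_mem_keys]
        simp only [decide_eq_false_iff_not]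
        intro hk
        exact hb hk
      rw [PySem.Dict.getD_of_not_contains _ _ h1, PySem.Dict.getD_of_not_contains _ _ h2]
  · have hcont : (rsh d.items).contains a = false := by
      rw [PySem.Dict.contains_eq_decide_mem_keys, hkeys]; simpa using hmem
    rw [PySem.Dict.getD_of_not_contains _ _ hcont, PySem.Dict.getD_empty]
    have h2 : d.contains (a, b) = false := by
      rw [PySem.Dict.contains_eq_decide_mem_keys]
      simp only [decide_eq_false_iff_not]
      intro hk
      apply hmem
      rw [PySem.Set.mem_ofList]
      obtain ⟨q, hql, hqe⟩ := List.mem_map.mp hk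
      have : q.1.1 = a := by rw [hqe]
      exact this ▸ List.mem_map_of_mem hql
    rw [PySem.Dict.getD_of_not_contains _ _ h2]

theorem core (d : PySem.Dict (String × String) Int) (hnd : d.keys.Nodup)
    (p : String × String) (v : Int) :
    rsh (d.insert p v).items = pstep (rsh d.items) (p, v) := by
  by_cases hc : d.contains p = true
  · -- key present: insert replaces in place
    obtain ⟨a, b⟩ := p
    have hnd' : (d.items.map (fun q => q.1)).Nodup := hnd
    have IH := rsh_items d.items hnd'
    have hkeys := keys_of_items_eq_Fitems d.items IH
    have hknd : (rsh d.items).keys.Nodup := by rw [hkeys]; exact PySem.Set.nodup_ofList _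
    have hpk : ((a, b) : String × String) ∈ d.items.map (fun q => q.1) :=
      (PySem.Dict.contains_iff_mem_keys d _).mp hc
    have hamem : a ∈ PySem.Set.ofList (d.items.map (fun q => q.1.1)) := by
      rw [PySem.Set.mem_ofList]
      obtain ⟨q, hql, hqe⟩ := List.mem_map.mp hpk
      have : q.1.1 = a := by rw [hqe]
      exact this ▸ List.mem_map_of_mem hql
    -- LHS via rsh_items
    have hndi : ((d.insert (a, b) v).items.map (fun q => q.1)).Nodup :=
      PySem.Dict.nodup_keys_insert d _ v hnd
    -- RHS: compute pstep
    have hacont : (rsh d.items).contains a = true := by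
      rw [PySem.Dict.contains_eq_decide_mem_keys, hkeys]; simpa using hamem
    have hin : ((a, PySem.Dict.mk ((d.items.filter (fun q => q.1.1 == a)).map (fun q => (q.1.2, q.2))))
        ∈ (rsh d.items).items) := by
      rw [IH]; unfold Fitems; exact List.mem_map_of_mem hamem
    have hgetD : (rsh d.items).getD a PySem.Dict.empty
        = PySem.Dict.mk ((d.items.filter (fun q => q.1.1 == a)).map (fun q => (q.1.2, q.2))) :=
      PySem.Dict.getD_of_mem_items _ hin hknd _
    have hbcont : (PySem.Dict.mk ((d.items.filter (fun q => q.1.1 == a)).map (fun q => (q.1.2, q.2)))).contains b = true := by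
      obtain ⟨q, hql, hqe⟩ := List.mem_map.mp hpk
      obtain ⟨⟨a', b'⟩, c⟩ := q
      rw [show ((a', b') : String × String) = (a, b) from hqe] at hql
      rw [PySem.Dict.contains_eq_decide_mem_keys]
      simp only [decide_eq_true_eq]
      exact List.mem_map_of_mem (mem_fl_of_key d.items hql)
    apply PySem.Dict.ext
    rw [rsh_items _ hndi]
    unfold pstep
    simp only
    rw [PySem.Dict.items_insert_of_contains _ _ hacont, IH]
    -- items of the insert on both sides
    have hitems : (d.insert (a, b) v).items
        = d.items.map (fun q => if q.1 == (a, b) then ((a, b), v) else q) :=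
      PySem.Dict.items_insert_of_contains d v hc
    unfold Fitems
    rw [hitems]
    have hfsts : (d.items.map (fun q => if q.1 == (a, b) then ((a, b), v) else q)).map (fun q => q.1.1)
        = d.items.map (fun q => q.1.1) := by
      rw [List.map_map]
      apply List.map_congr_left
      intro q hql
      by_cases hqp : q.1 == (a, b)
      · simp only [Function.comp_apply, if_pos hqp]
        have : q.1 = (a, b) := by simpa using hqp
        rw [this]
      · have hne : q.1 ≠ (a, b) := by simpa using hqp
        simp [Function.comp_apply, hne]
    rw [hfsts, List.map_map]
    apply List.map_congr_left
    intro a' ha'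
    by_cases haa : a' = a
    · subst haa
      simp only [Function.comp_apply, beq_self_eq_true, if_pos]
      congr 1
      rw [hgetD]
      apply PySem.Dict.ext
      rw [PySem.Dict.items_insert_of_contains _ _ hbcont]
      dsimp only
      rw [List.filter_map]
      have hpred : ((fun q => q.1.1 == a') ∘ fun q => if q.1 == (a', b) then ((a', b), v) else q)
          = fun q => q.1.1 == a' := by
        funext q
        by_cases hqp : (q.1 == (a', b)) = true
        · have hq1 : q.1 = (a', b) := by simpa using hqp
          simp [Function.comp_apply, hq1]
        · have hne : q.1 ≠ (a', b) := by simpa using hqp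
          simp [Function.comp_apply, hne]
      rw [hpred, List.map_map, List.map_map]
      apply List.map_congr_left
      intro q hql
      obtain ⟨hqmem, hqa⟩ := List.mem_filter.mp hql
      have hqa' : q.1.1 = a' := by simpa using hqa
      by_cases hqp : q.1 = (a', b)
      · simp [Function.comp_apply, hqp]
      · have hne2 : q.1.2 ≠ b := by
          intro h2
          exact hqp (Prod.ext_iff.mpr ⟨hqa', h2⟩)
        simp [Function.comp_apply, hqp, hne2]
    · simp only [Function.comp_apply]
      rw [if_neg (by simpa using haa)]
      congr 2
      rw [List.filter_map]
      have hpred : ((fun q => q.1.1 == a') ∘ fun q => if q.1 == (a, b) then ((a, b), v) else q)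
          = fun q => q.1.1 == a' := by
        funext q
        by_cases hqp : (q.1 == (a, b)) = true
        · have hq1 : q.1 = (a, b) := by simpa using hqp
          simp [Function.comp_apply, hq1]
        · have hne : q.1 ≠ (a, b) := by simpa using hqp
          simp [Function.comp_apply, hne]
      rw [hpred, List.map_map]
      apply List.map_congr_left
      intro q hql
      obtain ⟨hqmem, hqa⟩ := List.mem_filter.mp hql
      have hqa' : q.1.1 = a' := by simpa using hqa
      have hne : q.1 ≠ (a, b) := fun h => haa (by rw [← hqa', h])
      simp [Function.comp_apply, hne]
  · -- fresh key: insert appends, and rsh of an appended list is one more pstep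
    have hcf : d.contains p = false := by simpa using hc
    rw [PySem.Dict.items_insert_of_not_contains _ _ hcf]
    unfold rsh
    rw [List.foldl_append]
    rfl

def stepC (T : PySem.Dict String (PySem.Dict String Int)) (p : String × String) :
    PySem.Dict String (PySem.Dict String Int) :=
  T.insert p.1 ((T.getD p.1 PySem.Dict.empty).insert p.2
    ((T.getD p.1 PySem.Dict.empty).getD p.2 0 + 1))

theorem main_eq (ps : List (String × String)) :
    ps.foldl stepC PySem.Dict.empty = rsh (PySem.Dict.counter ps).items := by
  induction ps using List.reverseRecOn with
  | nil => rfl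
  | append_singleton ps p ih =>
    rw [List.foldl_append, List.foldl_cons, List.foldl_nil, ih]
    have hcnt : PySem.Dict.counter (ps ++ [p])
        = (PySem.Dict.counter ps).insert p ((PySem.Dict.counter ps).getD p 0 + 1) := by
      unfold PySem.Dict.counter
      rw [List.foldl_append, List.foldl_cons, List.foldl_nil]
      rfl
    rw [hcnt, core _ (PySem.Dict.nodup_keys_counter ps)]
    unfold stepC pstep
    simp only
    rw [rsh_getD_getD _ (PySem.Dict.nodup_keys_counter ps)]

theorem stepA_eq (T : PySem.Dict String (PySem.Dict String Int)) (a b : String) :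
    (if T.contains a = false then
      T.insert a (PySem.Dict.ofList [(b, 1)])
    else if (T.getD a PySem.Dict.empty).contains b = false then
      T.insert a ((T.getD a PySem.Dict.empty).insert b 1)
    else
      T.insert a ((T.getD a PySem.Dict.empty).insert b
        ((T.getD a PySem.Dict.empty).getD b 0 + 1))) = stepC T (a, b) := by
  unfold stepC
  by_cases h : T.contains a = false
  · rw [if_pos h, PySem.Dict.getD_of_not_contains _ _ h]
    norm_num
    rfl
  · rw [if_neg h]
    by_cases h2 : (T.getD a PySem.Dict.empty).contains b = false
    · rw [if_pos h2, PySem.Dict.getD_of_not_contains _ _ h2]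
      norm_num
    · rw [if_neg h2]


theorem inner_aux {α β : Type} (g : β → α × α → β) (d : α) : ∀ (ts : List α) (acc : β),
    (List.range (ts.length - 1)).foldl
      (fun T k => g T (ts.getD k d, ts.getD (k + 1) d)) acc
    = (ts.zip (ts.drop 1)).foldl g acc := by
  intro ts
  induction ts with
  | nil => intro acc; simp
  | cons x rest ih =>
    intro acc
    cases rest with
    | nil => simp
    | cons y rest2 =>
      simp only [List.length_cons, Nat.add_sub_cancel, List.range_succ_eq_map,
        List.foldl_cons, List.foldl_map, List.drop_one, List.zip_cons_cons, List.tail_cons]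
      simp only [List.getD_cons_zero, List.getD_cons_succ]
      have := ih (g acc (x, y))
      simp only [List.length_cons, Nat.add_sub_cancel, List.drop_one, List.tail_cons] at this
      exact this

theorem inner_loop {β : Type} (g : β → String × String → β) (ts : List String) (acc : β) :
    (PySem.List.pyRange 0 ((ts.length : Int) - 1) 1).foldl
      (fun T i => g T (PySem.List.pyGetD ts i "", PySem.List.pyGetD ts (i + 1) "")) acc
    = (ts.zip (ts.drop 1)).foldl g acc := by
  cases ts with
  | nil => simp [PySem.List.pyRange_one_eq_nil]
  | cons x rest =>
    have hlen : ((x :: rest).length : Int) - 1 = ((rest.length : Nat) : Int) := by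
      simp
    rw [hlen, PySem.List.pyRange_zero_natCast, List.foldl_map]
    have hfe : (fun (T : β) (k : Nat) =>
        g T (PySem.List.pyGetD (x :: rest) (k : Int) "", PySem.List.pyGetD (x :: rest) ((k : Int) + 1) ""))
        = fun T k => g T ((x :: rest).getD k "", (x :: rest).getD (k + 1) "") := by
      funext T k
      have h1 : ((k : Int) + 1) = ((k + 1 : Nat) : Int) := by push_cast; ring
      rw [PySem.List.pyGetD_natCast, h1, PySem.List.pyGetD_natCast]
    rw [hfe]
    have := inner_aux g "" (x :: rest) acc
    simpa using this

-- ===== VERDICT (by name: the statement is the Claim_ definition above) =====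
theorem dependency_graph_spec : Claim_equal_dependency_graph := by
  intro log _ _
  show dependency_graph log = dependency_graph_alt log
  unfold dependency_graph dependency_graph_alt
  dsimp only
  generalize (PySem.Dict.mk (((PySem.Dict.ofList log).items).map (fun kv =>
      (kv.1, kv.2.map (fun ev => PySem.Dict.getD (PySem.Dict.ofList ev) "concept:name" ""))))).values = vals
  have houter : (fun (T : PySem.Dict String (PySem.Dict String Int)) (tasks : List String) =>
      (PySem.List.pyRange 0 ((tasks.length : Int) - 1) 1).foldl (fun T i =>
        if T.contains (PySem.List.pyGetD tasks i "") = false then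
          T.insert (PySem.List.pyGetD tasks i "") (PySem.Dict.ofList [(PySem.List.pyGetD tasks (i + 1) "", 1)])
        else if (T.getD (PySem.List.pyGetD tasks i "") PySem.Dict.empty).contains (PySem.List.pyGetD tasks (i + 1) "") = false then
          T.insert (PySem.List.pyGetD tasks i "") ((T.getD (PySem.List.pyGetD tasks i "") PySem.Dict.empty).insert (PySem.List.pyGetD tasks (i + 1) "") 1)
        else
          T.insert (PySem.List.pyGetD tasks i "") ((T.getD (PySem.List.pyGetD tasks i "") PySem.Dict.empty).insert (PySem.List.pyGetD tasks (i + 1) "")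
            ((T.getD (PySem.List.pyGetD tasks i "") PySem.Dict.empty).getD (PySem.List.pyGetD tasks (i + 1) "") 0 + 1))) T)
      = fun T tasks => (tasks.zip (tasks.drop 1)).foldl stepC T := by
    funext T tasks
    have hbody : (fun (T : PySem.Dict String (PySem.Dict String Int)) (i : Int) =>
        if T.contains (PySem.List.pyGetD tasks i "") = false then
          T.insert (PySem.List.pyGetD tasks i "") (PySem.Dict.ofList [(PySem.List.pyGetD tasks (i + 1) "", 1)])
        else if (T.getD (PySem.List.pyGetD tasks i "") PySem.Dict.empty).contains (PySem.List.pyGetD tasks (i + 1) "") = false then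
          T.insert (PySem.List.pyGetD tasks i "") ((T.getD (PySem.List.pyGetD tasks i "") PySem.Dict.empty).insert (PySem.List.pyGetD tasks (i + 1) "") 1)
        else
          T.insert (PySem.List.pyGetD tasks i "") ((T.getD (PySem.List.pyGetD tasks i "") PySem.Dict.empty).insert (PySem.List.pyGetD tasks (i + 1) "")
            ((T.getD (PySem.List.pyGetD tasks i "") PySem.Dict.empty).getD (PySem.List.pyGetD tasks (i + 1) "") 0 + 1)))
        = fun T i => stepC T (PySem.List.pyGetD tasks i "", PySem.List.pyGetD tasks (i + 1) "") := by
      funext T i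
      exact stepA_eq T _ _
    rw [hbody]
    exact inner_loop stepC tasks T
  rw [houter, ← List.foldl_flatMap, PySem.Dict.foldl_insert_getD_add_one_eq_counter, main_eq]
  rfl
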